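-- pv_equiv track=rewrite | github.com/parapente/PiFi | src/lib/ztext.py | convert_to_z_bytes
-- ===== SOURCE A (Python) =====
-- def convert_to_z_bytes(buf: list) -> list:
--     output = []
--     byte_count = 1
--     b1 = 0
--     b2 = 0
--     for z_char in buf:
--         if (byte_count % 3) == 1:
--             b1 = z_char << 2
--         elif (byte_count % 3) == 2:
--             p1 = z_char >> 3
--             p2 = (z_char & 7) << 5
--             b1 += p1
--             b2 = p2
--         else:
--             b2 += z_char
--             if byte_count == len(buf):
--                 b1 |= 128
--             output.append(b1)
--             output.append(b2)
--         byte_count += 1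
--     return output
-- ===== SOURCE B (Python) =====
-- def convert_to_z_bytes(buf: list) -> list:
--     output = []
--     n = len(buf)
--     for g in range(n // 3):
--         z1, z2, z3 = buf[3 * g], buf[3 * g + 1], buf[3 * g + 2]
--         b1 = (z1 << 2) + (z2 >> 3)
--         b2 = ((z2 & 7) << 5) + z3
--         if 3 * (g + 1) == n:
--             b1 |= 128
--         output.append(b1)
--         output.append(b2)
--     return output
-- ===== Notes on version B (the rewrite author's own statement) =====
-- stated objective: simpler
-- what changed: Replaced A's per-character byte_count % 3 state machine carrying partial bytes b1/b2 across iterations by a loop over complete triples (g in range(len(buf)//3)) that computes both output bytes of each triple directly; the end marker is set when 3*(g+1) == len(buf), and trailing incomplete groups are skipped because the range covers only full triples.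
import Mathlib
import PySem

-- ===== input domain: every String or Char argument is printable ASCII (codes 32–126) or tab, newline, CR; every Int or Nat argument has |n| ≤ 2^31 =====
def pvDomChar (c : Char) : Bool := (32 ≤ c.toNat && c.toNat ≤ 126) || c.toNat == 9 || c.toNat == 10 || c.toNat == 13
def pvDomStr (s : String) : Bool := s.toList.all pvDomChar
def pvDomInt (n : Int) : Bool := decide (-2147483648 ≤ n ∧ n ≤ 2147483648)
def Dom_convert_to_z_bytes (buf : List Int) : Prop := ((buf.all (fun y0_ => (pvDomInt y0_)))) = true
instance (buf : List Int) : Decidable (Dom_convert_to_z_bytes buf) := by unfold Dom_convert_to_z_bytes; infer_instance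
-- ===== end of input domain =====

-- B replaces A's per-character `byte_count % 3` state machine by a loop over complete
-- triples computing both output bytes directly (objective: simpler); same return values.

-- ===== PORT A =====
-- step of A's for-loop; state = (output, byte_count, b1, b2); n = len(buf)
def pvAStep (n : Int) (st : List Int × Int × Int × Int) (z : Int) : List Int × Int × Int × Int :=
  match st with
  | (output, bc, b1, b2) =>
    if bc % 3 = 1 then (output, bc + 1, z <<< (2 : Nat), b2)
    else if bc % 3 = 2 then (output, bc + 1, b1 + (z >>> (3 : Nat)), (PySem.Int.band z 7) <<< (5 : Nat))
    else
      let b2' := b2 + z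
      let b1' := if bc = n then PySem.Int.bor b1 128 else b1
      (output ++ [b1', b2'], bc + 1, b1', b2')

def convert_to_z_bytes (buf : List Int) : List Int :=
  (buf.foldl (pvAStep (buf.length : Int)) ([], 1, 0, 0)).1

-- ===== PORT B =====
-- body of B's for-loop over g in range(n // 3); indices 3*g,3*g+1,3*g+2 are always in
-- range, so the pyGetD default 0 is never used
def pvBStep (buf : List Int) (n : Int) (output : List Int) (g : Int) : List Int :=
  let z1 := PySem.List.pyGetD buf (3 * g) 0
  let z2 := PySem.List.pyGetD buf (3 * g + 1) 0
  let z3 := PySem.List.pyGetD buf (3 * g + 2) 0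
  let b1 := (z1 <<< (2 : Nat)) + (z2 >>> (3 : Nat))
  let b2 := ((PySem.Int.band z2 7) <<< (5 : Nat)) + z3
  let b1 := if 3 * (g + 1) = n then PySem.Int.bor b1 128 else b1
  output ++ [b1, b2]

def convert_to_z_bytes_alt (buf : List Int) : List Int :=
  let n : Int := (buf.length : Int)
  (PySem.List.pyRange 0 (PySem.Int.floordiv n 3) 1).foldl (pvBStep buf n) []

-- ===== PRECONDITION & SPEC =====
def Spec_convert_to_z_bytes (buf : List Int) (out : List Int) : Prop := out = convert_to_z_bytes_alt buf
instance (buf : List Int) (out : List Int) : Decidable (Spec_convert_to_z_bytes buf out) := by unfold Spec_convert_to_z_bytes; infer_instance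

-- ===== CLAIM (what is proved, stated in full; the proofs are below) =====
def Claim_equal_convert_to_z_bytes : Prop := ∀ (buf : List Int), Dom_convert_to_z_bytes buf → Spec_convert_to_z_bytes buf (convert_to_z_bytes buf)

-- ===== LEMMAS AND PROOFS =====

-- common characterisation: pack complete leading triples, marker byte on the last triple
-- when nothing remains
def pvPack : List Int → List Int
  | z1 :: z2 :: z3 :: rest =>
      let b1 := (z1 <<< (2 : Nat)) + (z2 >>> (3 : Nat))
      let b2 := ((PySem.Int.band z2 7) <<< (5 : Nat)) + z3
      (if rest = [] then PySem.Int.bor b1 128 else b1) :: b2 :: pvPack rest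
  | _ => []

theorem pvAStep_1 (n : Int) (out : List Int) (bc b1 b2 z : Int) (h : bc % 3 = 1) :
    pvAStep n (out, bc, b1, b2) z = (out, bc + 1, z <<< (2 : Nat), b2) := by
  simp [pvAStep, h]

theorem pvAStep_2 (n : Int) (out : List Int) (bc b1 b2 z : Int) (h : bc % 3 = 2) :
    pvAStep n (out, bc, b1, b2) z =
      (out, bc + 1, b1 + (z >>> (3 : Nat)), (PySem.Int.band z 7) <<< (5 : Nat)) := by
  simp [pvAStep, h]

theorem pvAStep_0 (n : Int) (out : List Int) (bc b1 b2 z : Int) (h : bc % 3 = 0) :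
    pvAStep n (out, bc, b1, b2) z =
      (out ++ [if bc = n then PySem.Int.bor b1 128 else b1, b2 + z], bc + 1,
        (if bc = n then PySem.Int.bor b1 128 else b1), b2 + z) := by
  simp [pvAStep, h]

theorem pvA_loop (n : Int) :
    ∀ (s : List Int) (out : List Int) (bc b1 b2 : Int),
      bc % 3 = 1 → bc + s.length = n + 1 →
      (s.foldl (pvAStep n) (out, bc, b1, b2)).1 = out ++ pvPack s := by
  intro s
  induction s using pvPack.induct with
  | case1 z1 z2 z3 rest ih =>
    intro out bc b1 b2 h1 h2
    have hL : bc + ((rest.length : Int) + 3) = n + 1 := by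
      simp only [List.length_cons] at h2; push_cast at h2; omega
    have h2' : (bc + 1) % 3 = 2 := by omega
    have h3' : (bc + 1 + 1) % 3 = 0 := by omega
    rw [List.foldl_cons, pvAStep_1 n out bc b1 b2 z1 h1,
      List.foldl_cons, pvAStep_2 n out (bc + 1) (z1 <<< (2 : Nat)) b2 z2 h2',
      List.foldl_cons, pvAStep_0 n out (bc + 1 + 1) ((z1 <<< (2 : Nat)) + (z2 >>> (3 : Nat)))
        ((PySem.Int.band z2 7) <<< (5 : Nat)) z3 h3']
    have hlen : bc + 1 + 1 = n ↔ rest = [] := by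
      constructor
      · intro h
        have : rest.length = 0 := by omega
        exact List.eq_nil_of_length_eq_zero this
      · intro h
        have : (rest.length : Int) = 0 := by rw [h]; simp
        omega
    have h33 : bc + 1 + 1 + 1 = bc + 3 := by ring
    rw [h33, ih _ (bc + 3) _ _ (by omega) (by omega)]
    by_cases hr : rest = []
    · simp [pvPack, hr, if_pos (hlen.mpr hr)]
    · simp [pvPack, hr, if_neg (fun h => hr (hlen.mp h))]
  | case2 t ht =>
    intro out bc b1 b2 h1 h2
    rcases t with _ | ⟨a, _ | ⟨b, _ | ⟨c, r⟩⟩⟩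
    · simp [pvPack]
    · rw [List.foldl_cons, pvAStep_1 n out bc b1 b2 a h1]
      simp [pvPack]
    · have h2' : (bc + 1) % 3 = 2 := by omega
      rw [List.foldl_cons, pvAStep_1 n out bc b1 b2 a h1,
        List.foldl_cons, pvAStep_2 n out (bc + 1) (a <<< (2 : Nat)) b2 b h2']
      simp [pvPack]
    · exact (ht a b c r rfl).elim

theorem pvB_loop (buf : List Int) :
    ∀ (s : List Int) (out : List Int) (g0 : Int),
      0 ≤ g0 → buf.drop (3 * g0).toNat = s →
      3 * g0 + (s.length : Int) = (buf.length : Int) →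
      (PySem.List.pyRange g0 (PySem.Int.floordiv (buf.length : Int) 3) 1).foldl
          (pvBStep buf (buf.length : Int)) out = out ++ pvPack s := by
  intro s
  induction s using pvPack.induct with
  | case1 z1 z2 z3 rest ih =>
    intro out g0 hg hdrop hlen
    have hL : 3 * g0 + ((rest.length : Int) + 3) = (buf.length : Int) := by
      simp only [List.length_cons] at hlen; push_cast at hlen; omega
    have hfd : PySem.Int.floordiv (buf.length : Int) 3 = (buf.length : Int) / 3 :=
      PySem.Int.floordiv_eq_ediv_of_pos (by omega)
    have hgt : g0 < (buf.length : Int) / 3 := by omega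
    rw [hfd, PySem.List.pyRange_one_cons hgt]
    simp only [List.foldl]
    -- evaluate the three reads
    have hb : ∀ j : Nat, j < 3 →
        PySem.List.pyGetD buf (3 * g0 + (j : Int)) 0 = (z1 :: z2 :: z3 :: rest).getD j 0 := by
      intro j hj
      have hnn : (0:Int) ≤ 3 * g0 + (j:Int) := by omega
      have h3 : (3 * g0 + (j:Int)).toNat = (3 * g0).toNat + j := by omega
      rw [PySem.List.pyGetD_of_nonneg buf 0 hnn, h3,
        List.getD_eq_getElem?_getD, List.getD_eq_getElem?_getD, ← hdrop, List.getElem?_drop]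
    have e1 := hb 0 (by norm_num)
    have e2 := hb 1 (by norm_num)
    have e3 := hb 2 (by norm_num)
    norm_num at e1 e2 e3
    have hiff : 3 * (g0 + 1) = (buf.length : Int) ↔ rest = [] := by
      constructor
      · intro h
        have : rest.length = 0 := by omega
        exact List.eq_nil_of_length_eq_zero this
      · intro h
        have : (rest.length : Int) = 0 := by rw [h]; simp
        omega
    have hstep : pvBStep buf (buf.length : Int) out g0 =
        out ++ [(if rest = [] then
            PySem.Int.bor ((z1 <<< (2 : Nat)) + (z2 >>> (3 : Nat))) 128
          else (z1 <<< (2 : Nat)) + (z2 >>> (3 : Nat))),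
          (PySem.Int.band z2 7) <<< (5 : Nat) + z3] := by
      by_cases hr : rest = []
      · simp [pvBStep, e1, e2, e3, if_pos (hiff.mpr hr), hr]
      · simp [pvBStep, e1, e2, e3, if_neg (fun h => hr (hiff.mp h)), hr]
    rw [hstep]
    have hdrop' : buf.drop (3 * (g0 + 1)).toNat = rest := by
      have h3 : (3 * (g0 + 1)).toNat = (3 * g0).toNat + 3 := by omega
      rw [h3, ← List.drop_drop, hdrop]
      simp
    have hrec := ih (out ++ [(if rest = [] then
            PySem.Int.bor ((z1 <<< (2 : Nat)) + (z2 >>> (3 : Nat))) 128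
          else (z1 <<< (2 : Nat)) + (z2 >>> (3 : Nat))),
          (PySem.Int.band z2 7) <<< (5 : Nat) + z3]) (g0 + 1) (by omega) hdrop' (by omega)
    rw [hfd] at hrec
    rw [hrec]
    by_cases hr : rest = [] <;> simp [pvPack, hr]
  | case2 t ht =>
    intro out g0 hg hdrop hlen
    rcases t with _ | ⟨a, _ | ⟨b, _ | ⟨c, r⟩⟩⟩
    · simp only [List.length_nil] at hlen; push_cast at hlen
      have hfd : PySem.Int.floordiv (buf.length : Int) 3 = (buf.length : Int) / 3 :=
        PySem.Int.floordiv_eq_ediv_of_pos (by omega)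
      rw [hfd, PySem.List.pyRange_one_eq_nil (by omega)]
      simp [pvPack]
    · simp only [List.length_cons, List.length_nil] at hlen; push_cast at hlen
      have hfd : PySem.Int.floordiv (buf.length : Int) 3 = (buf.length : Int) / 3 :=
        PySem.Int.floordiv_eq_ediv_of_pos (by omega)
      rw [hfd, PySem.List.pyRange_one_eq_nil (by omega)]
      simp [pvPack]
    · simp only [List.length_cons, List.length_nil] at hlen; push_cast at hlen
      have hfd : PySem.Int.floordiv (buf.length : Int) 3 = (buf.length : Int) / 3 :=
        PySem.Int.floordiv_eq_ediv_of_pos (by omega)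
      rw [hfd, PySem.List.pyRange_one_eq_nil (by omega)]
      simp [pvPack]
    · exact (ht a b c r rfl).elim

-- ===== VERDICT (by name: the statement is the Claim_ definition above) =====
theorem convert_to_z_bytes_spec : Claim_equal_convert_to_z_bytes := by
  intro buf _
  unfold Spec_convert_to_z_bytes convert_to_z_bytes convert_to_z_bytes_alt
  rw [pvA_loop (buf.length : Int) buf [] 1 0 0 (by decide) (by omega)]
  rw [pvB_loop buf buf [] 0 (by omega) (by simp) (by simp)]
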